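-- pv_equiv track=rewrite | github.com/flext-sh/flext-target-ldap | src/flext_target_ldap/patterns/ldap_patterns.py | _normalize_ldap_attribute_name
-- ===== SOURCE A (Python) =====
-- def _normalize_ldap_attribute_name(name: str) -> str:
--     """Normalize attribute name for LDAP conventions."""
--     # LDAP attribute naming conventions
--     normalized = name.replace("_", "").replace("-", "")
--
--     # Convert to camelCase for LDAP
--     if "_" in name or "-" in name:
--         parts = name.replace("-", "_").split("_")
--         normalized = parts[0].lower() + "".join(
--             word.capitalize() for word in parts[1:]
--         )
--     else:
--         normalized = name.lower()
--
--     return normalized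
-- ===== SOURCE B (Python) =====
-- def _normalize_ldap_attribute_name(name: str) -> str:
--     """Normalize attribute name for LDAP conventions (single left-to-right scan)."""
--     out = []
--     cap = False
--     for ch in name:
--         if ch == "_" or ch == "-":
--             cap = True
--         else:
--             out.append(ch.upper() if cap else ch.lower())
--             cap = False
--     return "".join(out)
-- ===== Notes on version B (the rewrite author's own statement) =====
-- stated objective: simpler
-- what changed: Replaced the replace/split('_')/join camelCase pipeline (with its delimiter-presence branch) by a single left-to-right scan over the characters keeping a capitalize-next flag.
import Mathlib
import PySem

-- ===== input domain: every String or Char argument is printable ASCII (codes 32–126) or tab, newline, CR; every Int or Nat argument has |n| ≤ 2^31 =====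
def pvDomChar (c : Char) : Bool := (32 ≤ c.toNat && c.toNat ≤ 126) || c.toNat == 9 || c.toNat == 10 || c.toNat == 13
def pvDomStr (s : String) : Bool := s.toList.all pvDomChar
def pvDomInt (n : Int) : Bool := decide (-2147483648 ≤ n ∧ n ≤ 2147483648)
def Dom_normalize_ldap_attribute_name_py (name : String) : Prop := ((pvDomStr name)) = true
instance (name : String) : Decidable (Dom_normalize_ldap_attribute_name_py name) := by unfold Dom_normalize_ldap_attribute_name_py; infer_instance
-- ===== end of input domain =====

-- B replaces A's replace/split/join pipeline by a single left-to-right scan with a capitalize-next flag (simpler, one pass).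

-- ===== PORT A =====
-- Python str.capitalize: first char titlecased, rest lowercased; upperChar is exact for titlecase on the ASCII domain.
def pyCapitalize (w : List Char) : List Char :=
  match w with
  | [] => []
  | c :: cs => PySem.Chars.upperChar c :: PySem.Chars.lower cs

def normalize_ldap_attribute_name_py (name : String) : String :=
  let _normalized := PySem.Str.replace (PySem.Str.replace name "_" "") "-" ""
  if PySem.Str.isIn "_" name || PySem.Str.isIn "-" name then
    let parts := PySem.Chars.splitOn (PySem.Chars.replace name.toList ['-'] ['_']) ['_']
    String.ofList (PySem.Chars.lower (PySem.List.pyGetD parts 0 []) ++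
      PySem.Chars.join [] (parts.tail.map pyCapitalize))
  else
    PySem.Str.lower name

-- ===== PORT B =====
def altGo : List Char → Bool → List Char
  | [], _ => []
  | c :: rest, cap =>
    if c = '_' ∨ c = '-' then altGo rest true
    else (if cap then PySem.Chars.upperChar c else PySem.Chars.lowerChar c) :: altGo rest false

def normalize_ldap_attribute_name_py_alt (name : String) : String :=
  String.ofList (altGo name.toList false)

-- ===== PRECONDITION & SPEC =====
def Spec_normalize_ldap_attribute_name_py (name : String) (out : String) : Prop := out = normalize_ldap_attribute_name_py_alt name
instance (name : String) (out : String) : Decidable (Spec_normalize_ldap_attribute_name_py name out) := by unfold Spec_normalize_ldap_attribute_name_py; infer_instance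

-- ===== CLAIM (what is proved, stated in full; the proofs are below) =====
def Claim_equal_normalize_ldap_attribute_name_py : Prop := ∀ (name : String), Dom_normalize_ldap_attribute_name_py name → Spec_normalize_ldap_attribute_name_py name (normalize_ldap_attribute_name_py name)

-- ===== LEMMAS AND PROOFS =====

-- the character substitution performed by name.replace("-", "_")
def replDash (c : Char) : Char := if c = '-' then '_' else c

-- splitting on '_' as a structural recursion: (first piece, remaining pieces)
def splitU : List Char → List Char × List (List Char)
  | [] => ([], [])
  | c :: t =>
    let r := splitU t
    if c = '_' then ([], r.1 :: r.2) else (c :: r.1, r.2)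

lemma replace_go_dash (fuel : Nat) : ∀ (l acc : List Char), l.length ≤ fuel →
    PySem.Chars.replace.go ['-'] ['_'] fuel l acc = acc.reverse ++ l.map replDash := by
  induction fuel with
  | zero =>
    intro l acc h
    have : l = [] := by cases l <;> simp_all
    subst this
    simp [PySem.Chars.replace.go]
  | succ n ih =>
    intro l acc h
    cases l with
    | nil => simp [PySem.Chars.replace.go]
    | cons c t =>
      by_cases hc : c = '-'
      · subst hc
        rw [PySem.Chars.replace.go]
        rw [if_pos (by simp)]
        simp only [List.length_cons, List.length_nil, List.drop_succ_cons, List.drop_zero,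
          List.reverse_singleton, List.singleton_append]
        rw [ih t ('_' :: acc) (by simpa using Nat.le_of_succ_le_succ h)]
        simp [replDash]
      · have hnp : ¬ (['-'].isPrefixOf (c :: t) = true) := by
          simp only [List.isPrefixOf_iff_prefix, List.cons_prefix_cons, List.nil_prefix, and_true]
          exact fun h => hc h.symm
        rw [PySem.Chars.replace.go]
        rw [if_neg hnp]
        rw [ih t (c :: acc) (by simpa using Nat.le_of_succ_le_succ h)]
        simp [replDash, hc]

lemma replace_dash (s : List Char) :
    PySem.Chars.replace s ['-'] ['_'] = s.map replDash := by
  rw [PySem.Chars.replace]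
  rw [if_neg (by simp)]
  exact (replace_go_dash s.length s [] le_rfl).trans (by simp)

lemma splitOn_go_underscore (fuel : Nat) : ∀ (l cur : List Char) (acc : List (List Char)),
    l.length < fuel →
    PySem.Chars.splitOn.go ['_'] fuel l cur acc =
      acc.reverse ++ (cur.reverse ++ (splitU l).1) :: (splitU l).2 := by
  induction fuel with
  | zero => intro l cur acc h; omega
  | succ n ih =>
    intro l cur acc h
    cases l with
    | nil => simp [PySem.Chars.splitOn.go, splitU]
    | cons c t =>
      by_cases hc : c = '_'
      · subst hc
        rw [PySem.Chars.splitOn.go]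
        rw [if_pos (by simp)]
        simp only [List.length_cons, List.length_nil, List.drop_succ_cons, List.drop_zero]
        rw [ih t [] (List.reverse cur :: acc) (by simpa using Nat.lt_of_succ_lt_succ h)]
        simp [splitU]
      · have hnp : ¬ (['_'].isPrefixOf (c :: t) = true) := by
          simp only [List.isPrefixOf_iff_prefix, List.cons_prefix_cons, List.nil_prefix, and_true]
          exact fun h => hc h.symm
        rw [PySem.Chars.splitOn.go]
        rw [if_neg hnp]
        rw [ih t (c :: cur) acc (by simpa using Nat.lt_of_succ_lt_succ h)]
        simp [splitU, hc]

lemma splitOn_underscore (t : List Char) :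
    PySem.Chars.splitOn t ['_'] = (splitU t).1 :: (splitU t).2 := by
  rw [PySem.Chars.splitOn, splitOn_go_underscore (t.length + 1) t [] [] (by omega)]
  simp

lemma join_nil_flatten (ps : List (List Char)) : PySem.Chars.join [] ps = ps.flatten := by
  induction ps with
  | nil => exact PySem.Chars.join_nil []
  | cons p ps ih =>
    cases ps with
    | nil => simp only [List.flatten_cons, List.flatten_nil, List.append_nil]; exact PySem.Chars.join_singleton ([] : List Char) p
    | cons q qs => rw [PySem.Chars.join_cons_cons, ih]; simp

-- the heart: A's split-and-join camelCase equals B's one-pass scan, for either flag state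
lemma main_scan (s : List Char) : ∀ (cap : Bool),
    (if cap then pyCapitalize (splitU (s.map replDash)).1
     else PySem.Chars.lower (splitU (s.map replDash)).1) ++
      ((splitU (s.map replDash)).2.map pyCapitalize).flatten = altGo s cap := by
  induction s with
  | nil => intro cap; cases cap <;> simp [splitU, altGo, pyCapitalize, PySem.Chars.lower]
  | cons c t ih =>
    intro cap
    by_cases hd : c = '_' ∨ c = '-'
    · have hrepl : replDash c = '_' := by
        rcases hd with h | h <;> simp [replDash, h]
      rw [altGo, if_pos hd, ← ih true]
      cases cap <;>
        simp [hrepl, splitU, pyCapitalize, PySem.Chars.lower]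
    · rw [not_or] at hd
      have hrepl : replDash c = c := by simp [replDash, hd.2]
      rw [altGo, if_neg (show ¬(c = '_' ∨ c = '-') from not_or.mpr ⟨hd.1, hd.2⟩), ← ih false]
      cases cap <;>
        simp [hrepl, splitU, hd.1, pyCapitalize, PySem.Chars.lower]
-- note: in the cons/non-delimiter/cap=true case the head char is upperChar'd on both sides

lemma no_delim_scan (s : List Char) (h1 : '_' ∉ s) (h2 : '-' ∉ s) :
    altGo s false = PySem.Chars.lower s := by
  induction s with
  | nil => simp [altGo, PySem.Chars.lower]
  | cons c t ih =>
    simp only [List.mem_cons, not_or] at h1 h2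
    rw [altGo, if_neg (by tauto)]
    rw [ih h1.2 h2.2]
    simp [PySem.Chars.lower]

lemma singleton_infix_iff_mem (c : Char) (s : List Char) : [c] <:+: s ↔ c ∈ s := by
  constructor
  · rintro ⟨t, u, rfl⟩; simp
  · intro h
    obtain ⟨a, b, rfl⟩ := List.append_of_mem h
    exact ⟨a, b, by simp⟩

-- ===== VERDICT (by name: the statement is the Claim_ definition above) =====
theorem normalize_ldap_attribute_name_py_spec : Claim_equal_normalize_ldap_attribute_name_py := by
  intro name _
  unfold Spec_normalize_ldap_attribute_name_py
  unfold normalize_ldap_attribute_name_py normalize_ldap_attribute_name_py_alt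
  by_cases hcond : (PySem.Str.isIn "_" name || PySem.Str.isIn "-" name) = true
  · rw [if_pos hcond]
    simp only [replace_dash, splitOn_underscore, PySem.List.pyGetD_zero_cons, List.tail_cons,
      join_nil_flatten]
    have h := main_scan name.toList false
    simp only [Bool.false_eq_true, if_false] at h
    rw [h]
  · rw [if_neg hcond]
    simp only [Bool.or_eq_true, not_or, Bool.not_eq_true] at hcond
    have h1 : '_' ∉ name.toList := by
      have := (PySem.Chars.isIn_eq_false_iff ['_'] name.toList).mp (by simpa [PySem.Str.isIn] using hcond.1)
      simpa [singleton_infix_iff_mem] using this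
    have h2 : '-' ∉ name.toList := by
      have := (PySem.Chars.isIn_eq_false_iff ['-'] name.toList).mp (by simpa [PySem.Str.isIn] using hcond.2)
      simpa [singleton_infix_iff_mem] using this
    rw [PySem.Str.lower, ← no_delim_scan name.toList h1 h2]
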